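-- pv_equiv track=rewrite | github.com/kaluginpeter/Algorithms_and_structures_tasks | Python_Solutions/Codeforces/155A._I_love_username.py | solution
-- ===== SOURCE A (Python) =====
-- def solution(n: int, contests: list) -> str:
--     max_rate: int = contests[0]
--     min_rate: int = contests[0]
--     amaizing: int = 0
--     for rate in range(1, n):
--         if contests[rate] > max_rate:
--             max_rate = contests[rate]
--             amaizing += 1
--         elif contests[rate] < min_rate:
--             min_rate = contests[rate]
--             amaizing += 1
--     return str(amaizing)
-- ===== SOURCE B (Python) =====
-- def solution(n: int, contests: list) -> str:
--     running_max = [contests[0]]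
--     running_min = [contests[0]]
--     for i in range(1, n):
--         running_max.append(max(running_max[-1], contests[i]))
--         running_min.append(min(running_min[-1], contests[i]))
--     return str(sum(1 for i in range(1, n)
--                    if running_max[i] > running_max[i - 1]
--                    or running_min[i] < running_min[i - 1]))
-- ===== Notes on version B (the rewrite author's own statement) =====
-- stated objective: alternative
-- what changed: B materializes running-maximum and running-minimum prefix arrays in one pass and then, in a second pass, counts the positions where a prefix extreme strictly changes, instead of A's single loop tracking two scalars and counting inside its branches.
import Mathlib
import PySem

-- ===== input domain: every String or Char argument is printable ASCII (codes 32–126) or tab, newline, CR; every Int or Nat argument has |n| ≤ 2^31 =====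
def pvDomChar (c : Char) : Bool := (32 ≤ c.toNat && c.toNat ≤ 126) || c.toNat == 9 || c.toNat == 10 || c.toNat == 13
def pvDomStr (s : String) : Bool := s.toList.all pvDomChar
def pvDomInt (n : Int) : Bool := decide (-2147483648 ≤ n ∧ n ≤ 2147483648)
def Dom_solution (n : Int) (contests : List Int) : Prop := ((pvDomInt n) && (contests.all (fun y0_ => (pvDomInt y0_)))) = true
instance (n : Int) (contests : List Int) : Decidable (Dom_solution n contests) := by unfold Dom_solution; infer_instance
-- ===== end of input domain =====

-- B builds running-max / running-min prefix arrays in one pass and then counts the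
-- positions where a prefix extreme strictly changes, instead of A's single scalar-tracking
-- loop with branch counting (alternative decomposition, same cost).

-- ===== PORT A =====
def solution (n : Int) (contests : List Int) : String :=
  let max_rate : Int := PySem.List.pyGetD contests 0 0
  let min_rate : Int := PySem.List.pyGetD contests 0 0
  let st := (PySem.List.pyRange 1 n 1).foldl
    (fun (st : Int × Int × Int) rate =>
      if PySem.List.pyGetD contests rate 0 > st.1 then
        (PySem.List.pyGetD contests rate 0, st.2.1, st.2.2 + 1)
      else if PySem.List.pyGetD contests rate 0 < st.2.1 then
        (st.1, PySem.List.pyGetD contests rate 0, st.2.2 + 1)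
      else st)
    (max_rate, min_rate, (0 : Int))
  PySem.Int.toStr st.2.2

-- ===== PORT B =====
def solution_alt (n : Int) (contests : List Int) : String :=
  let c0 : Int := PySem.List.pyGetD contests 0 0
  let arrs := (PySem.List.pyRange 1 n 1).foldl
    (fun (p : List Int × List Int) i =>
      (p.1 ++ [max (PySem.List.pyGetD p.1 (-1) 0) (PySem.List.pyGetD contests i 0)],
       p.2 ++ [min (PySem.List.pyGetD p.2 (-1) 0) (PySem.List.pyGetD contests i 0)]))
    ([c0], [c0])
  let cnt := (PySem.List.pyRange 1 n 1).foldl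
    (fun (acc : Int) i =>
      if PySem.List.pyGetD arrs.1 i 0 > PySem.List.pyGetD arrs.1 (i - 1) 0
         ∨ PySem.List.pyGetD arrs.2 i 0 < PySem.List.pyGetD arrs.2 (i - 1) 0
      then acc + 1 else acc)
    (0 : Int)
  PySem.Int.toStr cnt

-- ===== PRECONDITION & SPEC =====
-- Pre_ excludes exactly the inputs on which A raises IndexError: an empty contests list
-- (the contests[0] read) or n exceeding the list length (the contests[rate] read).
def Pre_solution (n : Int) (contests : List Int) : Prop :=
  contests ≠ [] ∧ n ≤ (contests.length : Int)
instance (n : Int) (contests : List Int) : Decidable (Pre_solution n contests) := by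
  unfold Pre_solution; infer_instance

def pvWitness_solution : Int × List Int := (4, [3, 1, 4, 1])

def Spec_solution (n : Int) (contests : List Int) (out : String) : Prop := out = solution_alt n contests
instance (n : Int) (contests : List Int) (out : String) : Decidable (Spec_solution n contests out) := by unfold Spec_solution; infer_instance

-- ===== CLAIM (what is proved, stated in full; the proofs are below) =====
def Claim_equal_solution : Prop := ∀ (n : Int) (contests : List Int), Dom_solution n contests → Pre_solution n contests → Spec_solution n contests (solution n contests)

-- ===== LEMMAS AND PROOFS =====

-- prefix maximum / minimum of contests[0..j] and the record count among positions 1..j,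
-- all through the total getter pyGetD (both ports read every index through it)
def pmaxF (contests : List Int) : Nat → Int
  | 0 => PySem.List.pyGetD contests 0 0
  | j + 1 => max (pmaxF contests j) (PySem.List.pyGetD contests ((j : Int) + 1) 0)

def pminF (contests : List Int) : Nat → Int
  | 0 => PySem.List.pyGetD contests 0 0
  | j + 1 => min (pminF contests j) (PySem.List.pyGetD contests ((j : Int) + 1) 0)

def cntF (contests : List Int) : Nat → Int
  | 0 => 0
  | j + 1 => cntF contests j +
      (if PySem.List.pyGetD contests ((j : Int) + 1) 0 > pmaxF contests j ∨
          PySem.List.pyGetD contests ((j : Int) + 1) 0 < pminF contests j then 1 else 0)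

lemma pmin_le_pmax (contests : List Int) (k : Nat) : pminF contests k ≤ pmaxF contests k := by
  induction k with
  | zero => simp [pminF, pmaxF]
  | succ j ih =>
      simp only [pminF, pmaxF]
      exact le_trans (min_le_left _ _) (le_trans ih (le_max_left _ _))

lemma foldA_eq (contests : List Int) (k : Nat) :
    (PySem.List.pyRange 1 (1 + (k : Int)) 1).foldl
      (fun (st : Int × Int × Int) rate =>
        if PySem.List.pyGetD contests rate 0 > st.1 then
          (PySem.List.pyGetD contests rate 0, st.2.1, st.2.2 + 1)
        else if PySem.List.pyGetD contests rate 0 < st.2.1 then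
          (st.1, PySem.List.pyGetD contests rate 0, st.2.2 + 1)
        else st)
      (PySem.List.pyGetD contests 0 0, PySem.List.pyGetD contests 0 0, (0 : Int))
    = (pmaxF contests k, pminF contests k, cntF contests k) := by
  induction k with
  | zero => simp [PySem.List.pyRange_one_eq_nil, pmaxF, pminF, cntF]
  | succ j ih =>
      have hsplit : PySem.List.pyRange 1 (1 + ((j : Int) + 1)) 1
          = PySem.List.pyRange 1 (1 + (j : Int)) 1 ++ [1 + (j : Int)] := by
        have := PySem.List.pyRange_one_succ_right (a := 1) (b := 1 + (j : Int)) (by omega)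
        rw [show (1 : Int) + ((j : Int) + 1) = (1 + (j : Int)) + 1 by ring, this]
      push_cast
      rw [hsplit, List.foldl_append, ih]
      have h1 : (1 : Int) + (j : Int) = (j : Int) + 1 := by ring
      simp only [List.foldl, h1, pmaxF, pminF, cntF]
      set v := PySem.List.pyGetD contests ((j : Int) + 1) 0 with hv
      by_cases h : v > pmaxF contests j
      · have hmin : min (pminF contests j) v = pminF contests j := by
          have := pmin_le_pmax contests j; omega
        simp [h, hmin]
        omega
      · by_cases h2 : v < pminF contests j
        · simp [h, h2]
          omega
        · simp [h, h2]
          omega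

lemma foldB1_eq (contests : List Int) (k : Nat) :
    (PySem.List.pyRange 1 (1 + (k : Int)) 1).foldl
      (fun (p : List Int × List Int) i =>
        (p.1 ++ [max (PySem.List.pyGetD p.1 (-1) 0) (PySem.List.pyGetD contests i 0)],
         p.2 ++ [min (PySem.List.pyGetD p.2 (-1) 0) (PySem.List.pyGetD contests i 0)]))
      ([PySem.List.pyGetD contests 0 0], [PySem.List.pyGetD contests 0 0])
    = ((List.range (k + 1)).map (pmaxF contests), (List.range (k + 1)).map (pminF contests)) := by
  induction k with
  | zero => simp [PySem.List.pyRange_one_eq_nil, List.range_succ, pmaxF, pminF]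
  | succ j ih =>
      have hsplit : PySem.List.pyRange 1 (1 + ((j : Int) + 1)) 1
          = PySem.List.pyRange 1 (1 + (j : Int)) 1 ++ [1 + (j : Int)] := by
        have := PySem.List.pyRange_one_succ_right (a := 1) (b := 1 + (j : Int)) (by omega)
        rw [show (1 : Int) + ((j : Int) + 1) = (1 + (j : Int)) + 1 by ring, this]
      push_cast
      rw [hsplit, List.foldl_append, ih]
      have h1 : (1 : Int) + (j : Int) = (j : Int) + 1 := by ring
      have hrng : List.range (j + 1) = List.range j ++ [j] := List.range_succ
      simp only [List.foldl, h1]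
      rw [hrng, List.map_append, List.map_append]
      simp only [List.map]
      rw [PySem.List.pyGetD_neg_one_append_singleton, PySem.List.pyGetD_neg_one_append_singleton]
      have : List.range (j + 1 + 1) = List.range (j + 1) ++ [j + 1] := List.range_succ
      rw [this, hrng, List.map_append, List.map_append, List.map_append, List.map_append]
      simp [pmaxF, pminF]

lemma foldB2_eq (contests : List Int) (K : Nat) (k : Nat) (hk : k ≤ K) :
    (PySem.List.pyRange 1 (1 + (k : Int)) 1).foldl
      (fun (acc : Int) i =>
        if PySem.List.pyGetD ((List.range (K + 1)).map (pmaxF contests)) i 0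
             > PySem.List.pyGetD ((List.range (K + 1)).map (pmaxF contests)) (i - 1) 0
           ∨ PySem.List.pyGetD ((List.range (K + 1)).map (pminF contests)) i 0
             < PySem.List.pyGetD ((List.range (K + 1)).map (pminF contests)) (i - 1) 0
        then acc + 1 else acc)
      (0 : Int)
    = cntF contests k := by
  induction k with
  | zero => simp [PySem.List.pyRange_one_eq_nil, cntF]
  | succ j ih =>
      have hsplit : PySem.List.pyRange 1 (1 + ((j : Int) + 1)) 1
          = PySem.List.pyRange 1 (1 + (j : Int)) 1 ++ [1 + (j : Int)] := by
        have := PySem.List.pyRange_one_succ_right (a := 1) (b := 1 + (j : Int)) (by omega)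
        rw [show (1 : Int) + ((j : Int) + 1) = (1 + (j : Int)) + 1 by ring, this]
      push_cast
      rw [hsplit, List.foldl_append, ih (by omega)]
      have h1 : (1 : Int) + (j : Int) = (j : Int) + 1 := by ring
      simp only [List.foldl, h1]
      have hlen : ((List.range (K + 1)).map (pmaxF contests)).length = K + 1 := by simp
      have hidx : ∀ (f : Nat → Int) (m : Nat), m ≤ K →
          PySem.List.pyGetD ((List.range (K + 1)).map f) ((m : Int)) 0 = f m := by
        intro f m hm
        rw [PySem.List.pyGetD_natCast]
        rw [List.getD_eq_getElem?_getD]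
        simp [Nat.lt_succ_of_le hm]
      have e1 : PySem.List.pyGetD ((List.range (K + 1)).map (pmaxF contests)) ((j : Int) + 1) 0
          = pmaxF contests (j + 1) := by
        have := hidx (pmaxF contests) (j + 1) (by omega); push_cast at this; exact this
      have e2 : PySem.List.pyGetD ((List.range (K + 1)).map (pmaxF contests)) ((j : Int) + 1 - 1) 0
          = pmaxF contests j := by
        have := hidx (pmaxF contests) j (by omega)
        rw [show (j : Int) + 1 - 1 = (j : Int) by ring]; exact this
      have e3 : PySem.List.pyGetD ((List.range (K + 1)).map (pminF contests)) ((j : Int) + 1) 0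
          = pminF contests (j + 1) := by
        have := hidx (pminF contests) (j + 1) (by omega); push_cast at this; exact this
      have e4 : PySem.List.pyGetD ((List.range (K + 1)).map (pminF contests)) ((j : Int) + 1 - 1) 0
          = pminF contests j := by
        have := hidx (pminF contests) j (by omega)
        rw [show (j : Int) + 1 - 1 = (j : Int) by ring]; exact this
      rw [e1, e2, e3, e4]
      simp only [cntF, pmaxF, pminF]
      split_ifs <;> omega

lemma solution_eq_alt (n : Int) (contests : List Int) :
    solution n contests = solution_alt n contests := by
  unfold solution solution_alt
  by_cases hn : n ≤ 1
  · simp [PySem.List.pyRange_one_eq_nil hn]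
  · obtain ⟨k, hk⟩ : ∃ k : Nat, n = 1 + (k : Int) := ⟨(n - 1).toNat, by omega⟩
    subst hk
    simp only [foldA_eq contests k, foldB1_eq contests k, foldB2_eq contests k k le_rfl]

-- ===== VERDICT (by name: the statement is the Claim_ definition above) =====
theorem solution_spec : Claim_equal_solution := by
  intro n contests _ _
  unfold Spec_solution
  exact solution_eq_alt n contests
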